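-- pv_equiv track=rewrite | github.com/AruJoy/beakjoon-problem | 백준/Gold/8983. 사냥꾼/사냥꾼.py | numberOfKilledAnimals
-- ===== SOURCE A (Python) =====
-- def isKilledInRange(animal,length):
--     x1 = animal[0] - length + animal[1]
--     x2 = animal[0] + length - animal[1]
--     return[x1, x2]
--
-- def isKilled(dangerZone, gunPorts):
--     left = 0
--     right = len(gunPorts)-1
--     while left <=right:
--         mid = (left + right) // 2
--
--         if dangerZone[0] <= gunPorts[mid] <= dangerZone[1]:
--             return True
--         elif gunPorts[mid] < dangerZone[0]:
--             left = mid + 1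
--         elif dangerZone[1] < gunPorts[mid]:
--             right = mid - 1
--     return False
--
-- def numberOfKilledAnimals(animals, gunPorts, length):
--     count = 0
--     for animal in animals:
--         if animal[1] > length:
--             continue
--         dangerZone = isKilledInRange(animal, length)
--         if isKilled(dangerZone, gunPorts):
--             count += 1
--     return count
-- ===== SOURCE B (Python) =====
-- def numberOfKilledAnimals(animals, gunPorts, length):
--     intervals = []
--     for animal in animals:
--         if animal[1] <= length:
--             intervals.append((animal[0] - length + animal[1], animal[0] + length - animal[1]))
--     intervals.sort(key=lambda iv: iv[0])
--     ports = sorted(gunPorts)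
--     count = 0
--     j = 0
--     n = len(ports)
--     for x1, x2 in intervals:
--         while j < n and ports[j] < x1:
--             j += 1
--         if j < n and ports[j] <= x2:
--             count += 1
--     return count
-- ===== Notes on version B (the rewrite author's own statement) =====
-- stated objective: alternative
-- what changed: Replaces the per-animal binary search with: build the danger intervals of eligible animals, sort them by left endpoint, sort the ports, and count stabbed intervals with a single forward-only two-pointer sweep.
-- outside the precondition, e.g. on numberOfKilledAnimals([(0, 0)], [5, 0], 0): A returns 0, B returns 1
import Mathlib
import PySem

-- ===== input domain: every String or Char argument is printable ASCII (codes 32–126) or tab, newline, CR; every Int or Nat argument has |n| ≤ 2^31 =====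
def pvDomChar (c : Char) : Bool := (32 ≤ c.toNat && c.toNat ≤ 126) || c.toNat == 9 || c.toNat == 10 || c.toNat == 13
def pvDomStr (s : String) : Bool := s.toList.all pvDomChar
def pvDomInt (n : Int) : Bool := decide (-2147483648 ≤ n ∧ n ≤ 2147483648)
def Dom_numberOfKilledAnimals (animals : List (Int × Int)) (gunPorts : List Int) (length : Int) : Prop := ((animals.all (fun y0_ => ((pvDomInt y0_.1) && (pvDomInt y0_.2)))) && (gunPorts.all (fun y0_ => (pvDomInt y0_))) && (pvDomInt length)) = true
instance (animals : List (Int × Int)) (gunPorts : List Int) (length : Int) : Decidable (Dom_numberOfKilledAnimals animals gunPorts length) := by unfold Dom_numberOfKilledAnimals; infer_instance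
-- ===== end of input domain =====

-- B replaces A's per-animal binary search by sorting the eligible danger intervals and the ports
-- and counting stabbed intervals with one forward-only two-pointer sweep (alternative algorithm).

-- ===== PORT A =====
def isKilledInRange (animal : Int × Int) (length : Int) : Int × Int :=
  (animal.1 - length + animal.2, animal.1 + length - animal.2)

-- the 'while left <= right' loop of isKilled, step for step
def isKilledLoop (dangerZone : Int × Int) (gunPorts : List Int) (left right : Int) : Bool :=
  if hlr : left ≤ right then
    let mid := PySem.Int.floordiv (left + right) 2
    let g := PySem.List.pyGetD gunPorts mid 0   -- mid is always in range on reachable states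
    if dangerZone.1 ≤ g ∧ g ≤ dangerZone.2 then true
    else if g < dangerZone.1 then isKilledLoop dangerZone gunPorts (mid + 1) right
    else if dangerZone.2 < g then isKilledLoop dangerZone gunPorts left (mid - 1)
    else false   -- unreachable: the three tests are exhaustive
  else false
termination_by (right + 1 - left).toNat
decreasing_by
  · have := PySem.Int.floordiv_two_mid_bounds hlr; omega
  · have := PySem.Int.floordiv_two_mid_bounds hlr; omega

def isKilled (dangerZone : Int × Int) (gunPorts : List Int) : Bool :=
  isKilledLoop dangerZone gunPorts 0 ((gunPorts.length : Int) - 1)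

def numberOfKilledAnimals (animals : List (Int × Int)) (gunPorts : List Int) (length : Int) : Int :=
  animals.foldl (fun count animal =>
    if animal.2 > length then count
    else if isKilled (isKilledInRange animal length) gunPorts then count + 1 else count) 0

-- ===== PORT B =====
-- the 'while j < n and ports[j] < x1' loop
def pvAdvance (ports : List Int) (x1 : Int) (j : Nat) : Nat :=
  if h : j < ports.length then
    if ports[j] < x1 then pvAdvance ports x1 (j + 1) else j
  else j
termination_by ports.length - j

-- the 'for x1, x2 in intervals' loop carrying (j, count)
def pvSweep (intervals : List (Int × Int)) (ports : List Int) (j : Nat) (count : Int) : Int :=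
  match intervals with
  | [] => count
  | iv :: rest =>
    let j' := pvAdvance ports iv.1 j
    if h : j' < ports.length then
      if ports[j'] ≤ iv.2 then pvSweep rest ports j' (count + 1)
      else pvSweep rest ports j' count
    else pvSweep rest ports j' count

def numberOfKilledAnimals_alt (animals : List (Int × Int)) (gunPorts : List Int) (length : Int) : Int :=
  let intervals := (animals.filter (fun a => a.2 ≤ length)).map
      (fun a => (a.1 - length + a.2, a.1 + length - a.2))
  let sIntervals := PySem.List.sorted intervals (fun iv => iv.1) false
  let ports := PySem.List.sorted gunPorts (fun x => x) false
  pvSweep sIntervals ports 0 0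

-- ===== PRECONDITION & SPEC =====
-- Pre_ excludes unsorted gunPorts on which some probe path matters: there A's binary-search
-- answer is an accidental artefact of its probe path (the second disjunct keeps the degenerate
-- unsorted inputs where every eligible animal's danger zone holds all ports or none).
def Pre_numberOfKilledAnimals (animals : List (Int × Int)) (gunPorts : List Int) (length : Int) : Prop :=
  gunPorts.Pairwise (· ≤ ·) ∨
    ∀ a ∈ animals, a.2 ≤ length →
      ((∀ p ∈ gunPorts, a.1 - length + a.2 ≤ p ∧ p ≤ a.1 + length - a.2) ∨
       (∀ p ∈ gunPorts, ¬(a.1 - length + a.2 ≤ p ∧ p ≤ a.1 + length - a.2)))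
instance (animals : List (Int × Int)) (gunPorts : List Int) (length : Int) : Decidable (Pre_numberOfKilledAnimals animals gunPorts length) := by unfold Pre_numberOfKilledAnimals; infer_instance

def pvWitness_numberOfKilledAnimals : (List (Int × Int)) × List Int × Int := ([(0, 0), (3, 1)], [1, 4], 2)

def Spec_numberOfKilledAnimals (animals : List (Int × Int)) (gunPorts : List Int) (length : Int) (out : Int) : Prop := out = numberOfKilledAnimals_alt animals gunPorts length
instance (animals : List (Int × Int)) (gunPorts : List Int) (length : Int) (out : Int) : Decidable (Spec_numberOfKilledAnimals animals gunPorts length out) := by unfold Spec_numberOfKilledAnimals; infer_instance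

-- ===== CLAIM (what is proved, stated in full; the proofs are below) =====
def Claim_equal_numberOfKilledAnimals : Prop := ∀ (animals : List (Int × Int)) (gunPorts : List Int) (length : Int), Dom_numberOfKilledAnimals animals gunPorts length → Pre_numberOfKilledAnimals animals gunPorts length → Spec_numberOfKilledAnimals animals gunPorts length (numberOfKilledAnimals animals gunPorts length)

-- ===== LEMMAS AND PROOFS =====

theorem pvAdvance_le_length (ports : List Int) (x1 : Int) (j : Nat) (h : j ≤ ports.length) :
    pvAdvance ports x1 j ≤ ports.length := by
  fun_induction pvAdvance ports x1 j with
  | case1 j h hl ih => exact ih (by omega)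
  | case2 j h hl => omega
  | case3 j h => omega

theorem pvAdvance_skipped (ports : List Int) (x1 : Int) (j : Nat) :
    ∀ k, j ≤ k → k < pvAdvance ports x1 j → ∀ h : k < ports.length, ports[k] < x1 := by
  fun_induction pvAdvance ports x1 j with
  | case1 j h hl ih =>
    intro k hk hk2 hk3
    rcases Nat.eq_or_lt_of_le hk with rfl | hlt
    · exact hl
    · exact ih k hlt hk2 hk3
  | case2 j h hl => intro k hk hk2 hk3; omega
  | case3 j h => intro k hk hk2 hk3; omega

theorem pvAdvance_stop (ports : List Int) (x1 : Int) (j : Nat)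
    (h : pvAdvance ports x1 j < ports.length) : x1 ≤ ports[pvAdvance ports x1 j] := by
  fun_induction pvAdvance ports x1 j with
  | case1 j h hl ih => exact ih ‹_›
  | case2 j h hl => omega
  | case3 j h => omega

theorem sortedGet_mono (ports : List Int) (hs : ports.Pairwise (· ≤ ·))
    (i k : Nat) (hik : i ≤ k) (hk : k < ports.length) :
    ports[i]'(by omega) ≤ ports[k] := by
  rcases Nat.eq_or_lt_of_le hik with rfl | hlt
  · exact le_refl _
  · exact (List.pairwise_iff_getElem.mp hs) i k (by omega) hk hlt

theorem stab_iff (ports : List Int) (hs : ports.Pairwise (· ≤ ·)) (x1 x2 : Int) (j : Nat)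
    (_hj : j ≤ ports.length)
    (hlo : ∀ k, k < j → ∀ h : k < ports.length, ports[k] < x1) :
    ((∃ h : pvAdvance ports x1 j < ports.length, ports[pvAdvance ports x1 j] ≤ x2) ↔
      ∃ p ∈ ports, x1 ≤ p ∧ p ≤ x2) := by
  constructor
  · rintro ⟨h, hle⟩
    exact ⟨ports[pvAdvance ports x1 j], List.getElem_mem h, pvAdvance_stop ports x1 j h, hle⟩
  · rintro ⟨p, hp, hx1, hx2⟩
    obtain ⟨i, hi, rfl⟩ := List.getElem_of_mem hp
    have hij : j ≤ i := by
      by_contra hc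
      exact absurd hx1 (not_le.mpr (hlo i (by omega) hi))
    have hji' : pvAdvance ports x1 j ≤ i := by
      by_contra hc
      exact absurd (pvAdvance_skipped ports x1 j i hij (by omega) hi) (by omega)
    exact ⟨by omega, le_trans (sortedGet_mono ports hs _ i hji' hi) hx2⟩

theorem pvSweep_eq (ports : List Int) (hs : ports.Pairwise (· ≤ ·)) :
    ∀ (intervals : List (Int × Int)) (j : Nat) (count : Int),
      j ≤ ports.length →
      (∀ iv ∈ intervals, ∀ k, k < j → ∀ h : k < ports.length, ports[k] < iv.1) →
      intervals.Pairwise (fun a b => a.1 ≤ b.1) →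
      pvSweep intervals ports j count =
        count + (intervals.countP (fun iv => decide (∃ p ∈ ports, iv.1 ≤ p ∧ p ≤ iv.2)) : Int) := by
  intro intervals
  induction intervals with
  | nil => intro j count _ _ _; simp [pvSweep]
  | cons iv rest ih =>
    intro j count hj hlo hpw
    have hj' : pvAdvance ports iv.1 j ≤ ports.length := pvAdvance_le_length ports iv.1 j hj
    have hstab := stab_iff ports hs iv.1 iv.2 j hj (hlo iv (by simp))
    have hlo' : ∀ iv2 ∈ rest, ∀ k, k < pvAdvance ports iv.1 j → ∀ h : k < ports.length, ports[k] < iv2.1 := by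
      intro iv2 hiv2 k hk h
      rcases Nat.lt_or_ge k j with hkj | hkj
      · exact hlo iv2 (by simp [hiv2]) k hkj h
      · exact lt_of_lt_of_le (pvAdvance_skipped ports iv.1 j k hkj hk h)
          ((List.pairwise_cons.mp hpw).1 iv2 hiv2)
    have hpw' := (List.pairwise_cons.mp hpw).2
    by_cases hst : ∃ p ∈ ports, iv.1 ≤ p ∧ p ≤ iv.2
    · obtain ⟨h1, h2⟩ := hstab.mpr hst
      simp only [pvSweep, dif_pos h1, if_pos h2, ih _ _ hj' hlo' hpw',
        List.countP_cons, hst, decide_true]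
      push_cast; ring
    · have hnot : ¬ ∃ h : pvAdvance ports iv.1 j < ports.length,
          ports[pvAdvance ports iv.1 j] ≤ iv.2 := fun h => hst (hstab.mp h)
      have : pvSweep (iv :: rest) ports j count = pvSweep rest ports (pvAdvance ports iv.1 j) count := by
        simp only [pvSweep]
        split
        · next h1 =>
          rw [if_neg]
          intro h2; exact hnot ⟨h1, h2⟩
        · rfl
      rw [this, ih _ _ hj' hlo' hpw']
      simp [hst]

theorem isKilledLoop_iff (dz : Int × Int) (ports : List Int) (hs : ports.Pairwise (· ≤ ·)) :
    ∀ left right : Int, 0 ≤ left → right ≤ (ports.length : Int) - 1 →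
      (isKilledLoop dz ports left right = true ↔
        ∃ i : Nat, left ≤ (i : Int) ∧ (i : Int) ≤ right ∧ ∃ h : i < ports.length,
          dz.1 ≤ ports[i] ∧ ports[i] ≤ dz.2) := by
  intro left right
  fun_induction isKilledLoop dz ports left right with
  | case1 left right hlr mid g hhit =>
    intro h0 h1
    have hmb : left ≤ mid ∧ mid ≤ right := PySem.Int.floordiv_two_mid_bounds hlr
    have hm : mid.toNat < ports.length := by omega
    have hg : g = ports[mid.toNat] :=
      PySem.List.pyGetD_eq_getElem ports 0 (by omega) (by omega)
    rw [hg] at hhit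
    simp only [true_iff]
    exact ⟨mid.toNat, by omega, by omega, hm, hhit.1, hhit.2⟩
  | case2 left right hlr mid g hmiss hlt ih =>
    intro h0 h1
    have hmb : left ≤ mid ∧ mid ≤ right := PySem.Int.floordiv_two_mid_bounds hlr
    have hm : mid.toNat < ports.length := by omega
    have hg : g = ports[mid.toNat] :=
      PySem.List.pyGetD_eq_getElem ports 0 (by omega) (by omega)
    rw [hg] at hlt
    rw [ih (by omega) h1]
    constructor
    · rintro ⟨i, hi1, hi2, hilen, hv⟩
      exact ⟨i, by omega, hi2, hilen, hv⟩
    · rintro ⟨i, hi1, hi2, hilen, hv1, hv2⟩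
      refine ⟨i, ?_, hi2, hilen, hv1, hv2⟩
      by_contra hc
      have : ports[i] ≤ ports[mid.toNat] := sortedGet_mono ports hs i mid.toNat (by omega) hm
      omega
  | case3 left right hlr mid g hmiss hge hgt ih =>
    intro h0 h1
    have hmb : left ≤ mid ∧ mid ≤ right := PySem.Int.floordiv_two_mid_bounds hlr
    have hm : mid.toNat < ports.length := by omega
    have hg : g = ports[mid.toNat] :=
      PySem.List.pyGetD_eq_getElem ports 0 (by omega) (by omega)
    rw [hg] at hgt
    rw [ih h0 (by omega)]
    constructor
    · rintro ⟨i, hi1, hi2, hilen, hv⟩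
      exact ⟨i, hi1, by omega, hilen, hv⟩
    · rintro ⟨i, hi1, hi2, hilen, hv1, hv2⟩
      refine ⟨i, hi1, ?_, hilen, hv1, hv2⟩
      by_contra hc
      have : ports[mid.toNat] ≤ ports[i] := sortedGet_mono ports hs mid.toNat i (by omega) hilen
      omega
  | case4 left right hlr mid g hmiss hge hle =>
    intro h0 h1
    exact absurd ⟨by omega, by omega⟩ hmiss
  | case5 left right hlr =>
    intro h0 h1
    refine iff_of_false (by simp) ?_
    rintro ⟨i, hi1, hi2, _⟩
    omega

theorem isKilled_iff (dz : Int × Int) (ports : List Int) (hs : ports.Pairwise (· ≤ ·)) :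
    (isKilled dz ports = true ↔ ∃ p ∈ ports, dz.1 ≤ p ∧ p ≤ dz.2) := by
  rw [isKilled, isKilledLoop_iff dz ports hs 0 ((ports.length : Int) - 1) (by omega) (by omega)]
  constructor
  · rintro ⟨i, _, _, hlen, hv1, hv2⟩
    exact ⟨ports[i], List.getElem_mem hlen, hv1, hv2⟩
  · rintro ⟨p, hp, hv1, hv2⟩
    obtain ⟨i, hi, rfl⟩ := List.getElem_of_mem hp
    exact ⟨i, by omega, by omega, hi, hv1, hv2⟩

theorem foldlA_eq (gunPorts : List Int) (length : Int) :
    ∀ (animals : List (Int × Int)) (c : Int),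
      animals.foldl (fun count animal =>
        if animal.2 > length then count
        else if isKilled ((animal.1 - length + animal.2, animal.1 + length - animal.2)) gunPorts then count + 1 else count) c =
      c + (animals.countP (fun a => decide (a.2 ≤ length) &&
            isKilled ((a.1 - length + a.2, a.1 + length - a.2)) gunPorts) : Int) := by
  intro animals
  induction animals with
  | nil => intro c; simp
  | cons a rest ih =>
    intro c
    simp only [List.foldl_cons, List.countP_cons, ih]
    by_cases h1 : a.2 > length
    · simp [h1, not_le.mpr h1]
    · by_cases h2 : isKilled ((a.1 - length + a.2, a.1 + length - a.2)) gunPorts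
      · simp [h1, h2, not_lt.mp h1]; ring
      · simp [h1, h2]

def pvPred (gunPorts : List Int) (length : Int) (a : Int × Int) : Bool :=
  decide (a.2 ≤ length) &&
    decide (∃ p ∈ gunPorts, a.1 - length + a.2 ≤ p ∧ p ≤ a.1 + length - a.2)

theorem isKilledLoop_sound (dz : Int × Int) (ports : List Int) :
    ∀ left right : Int, 0 ≤ left → right ≤ (ports.length : Int) - 1 →
      isKilledLoop dz ports left right = true →
      ∃ p ∈ ports, dz.1 ≤ p ∧ p ≤ dz.2 := by
  intro left right
  fun_induction isKilledLoop dz ports left right with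
  | case1 left right hlr mid g hhit =>
    intro h0 h1 _
    have hmb : left ≤ mid ∧ mid ≤ right := PySem.Int.floordiv_two_mid_bounds hlr
    have hm : mid.toNat < ports.length := by omega
    have hg : g = ports[mid.toNat] :=
      PySem.List.pyGetD_eq_getElem ports 0 (by omega) (by omega)
    rw [hg] at hhit
    exact ⟨ports[mid.toNat], List.getElem_mem hm, hhit.1, hhit.2⟩
  | case2 left right hlr mid g hmiss hlt ih =>
    intro h0 h1 h
    have hmb : left ≤ mid ∧ mid ≤ right := PySem.Int.floordiv_two_mid_bounds hlr
    exact ih (by omega) h1 h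
  | case3 left right hlr mid g hmiss hge hgt ih =>
    intro h0 h1 h
    have hmb : left ≤ mid ∧ mid ≤ right := PySem.Int.floordiv_two_mid_bounds hlr
    exact ih h0 (by omega) h
  | case4 left right hlr mid g hmiss hge hle =>
    intro h0 h1 h
    exact absurd ⟨by omega, by omega⟩ hmiss
  | case5 left right hlr =>
    intro _ _ h
    exact absurd h (by simp)

theorem isKilled_of_all (dz : Int × Int) (ports : List Int) (hne : ports ≠ [])
    (hall : ∀ p ∈ ports, dz.1 ≤ p ∧ p ≤ dz.2) : isKilled dz ports = true := by
  have hlen : 1 ≤ ports.length := List.length_pos_iff.mpr hne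
  rw [isKilled, isKilledLoop]
  have hlr : (0 : Int) ≤ (ports.length : Int) - 1 := by omega
  rw [dif_pos hlr]
  have hmb := PySem.Int.floordiv_two_mid_bounds hlr
  set mid := PySem.Int.floordiv (0 + ((ports.length : Int) - 1)) 2 with hmid
  have hm : mid.toNat < ports.length := by omega
  have hg : PySem.List.pyGetD ports mid 0 = ports[mid.toNat] :=
    PySem.List.pyGetD_eq_getElem ports 0 (by omega) (by omega)
  simp only [hg]
  rw [if_pos (hall _ (List.getElem_mem hm))]

theorem B_eq (animals : List (Int × Int)) (gunPorts : List Int) (length : Int) :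
    numberOfKilledAnimals_alt animals gunPorts length =
      (animals.countP (pvPred gunPorts length) : Int) := by
  show pvSweep _ _ 0 0 = _
  rw [pvSweep_eq (PySem.List.sorted gunPorts (fun x => x) false)
      (PySem.List.sorted_pairwise gunPorts (fun x => x)) _ 0 0 (by omega)
      (by intro iv _ k hk; omega) (PySem.List.sorted_pairwise _ _), zero_add]
  rw [List.Perm.countP_eq _ (PySem.List.sorted_perm _ _ false),
      List.countP_map, List.countP_filter]
  congr 1
  apply List.countP_congr
  intro a _
  simp [pvPred, PySem.List.mem_sorted, and_comm]

theorem A_eq_sorted (animals : List (Int × Int)) (gunPorts : List Int) (length : Int)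
    (hpre : gunPorts.Pairwise (· ≤ ·)) :
    numberOfKilledAnimals animals gunPorts length =
      (animals.countP (pvPred gunPorts length) : Int) := by
  unfold numberOfKilledAnimals isKilledInRange
  rw [foldlA_eq, zero_add]
  congr 1
  apply List.countP_congr
  intro a _
  have hk := isKilled_iff (a.1 - length + a.2, a.1 + length - a.2) gunPorts hpre
  by_cases h2 : a.2 ≤ length
  · by_cases hst : ∃ p ∈ gunPorts, a.1 - length + a.2 ≤ p ∧ p ≤ a.1 + length - a.2
    · simp_all [pvPred]
    · simp_all [pvPred]
  · simp_all [pvPred]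

theorem A_eq_allnone (animals : List (Int × Int)) (gunPorts : List Int) (length : Int)
    (hdeg : ∀ a ∈ animals, a.2 ≤ length →
      ((∀ p ∈ gunPorts, a.1 - length + a.2 ≤ p ∧ p ≤ a.1 + length - a.2) ∨
       (∀ p ∈ gunPorts, ¬(a.1 - length + a.2 ≤ p ∧ p ≤ a.1 + length - a.2)))) :
    numberOfKilledAnimals animals gunPorts length =
      (animals.countP (pvPred gunPorts length) : Int) := by
  unfold numberOfKilledAnimals isKilledInRange
  rw [foldlA_eq, zero_add]
  congr 1
  apply List.countP_congr
  intro a ha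
  by_cases h2 : a.2 ≤ length
  · rcases hdeg a ha h2 with hall | hnone
    · rcases List.eq_nil_or_concat' gunPorts with rfl | ⟨l, p0, rfl⟩
      · simp [pvPred, isKilled, isKilledLoop]
      · have hk := isKilled_of_all (a.1 - length + a.2, a.1 + length - a.2) (l ++ [p0])
          (by simp) (by simpa using hall)
        have hex : ∃ p ∈ l ++ [p0], a.1 - length + a.2 ≤ p ∧ p ≤ a.1 + length - a.2 :=
          ⟨p0, by simp, hall p0 (by simp)⟩
        simp_all [pvPred]
    · have hk : isKilled (a.1 - length + a.2, a.1 + length - a.2) gunPorts = false := by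
        by_contra hc
        rcases isKilledLoop_sound (a.1 - length + a.2, a.1 + length - a.2) gunPorts 0
          ((gunPorts.length : Int) - 1) (by omega) (by omega)
          (by revert hc; rw [isKilled]; cases isKilledLoop (a.1 - length + a.2, a.1 + length - a.2) gunPorts 0 ((gunPorts.length : Int) - 1) <;> simp)
          with ⟨p, hp, hv⟩
        exact hnone p hp hv
      have hex : ¬ ∃ p ∈ gunPorts, a.1 - length + a.2 ≤ p ∧ p ≤ a.1 + length - a.2 := by
        rintro ⟨p, hp, hv⟩; exact hnone p hp hv
      simp_all [pvPred]
  · simp_all [pvPred]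

-- ===== VERDICT (by name: the statement is the Claim_ definition above) =====
theorem numberOfKilledAnimals_spec : Claim_equal_numberOfKilledAnimals := by
  intro animals gunPorts length _ hpre
  show numberOfKilledAnimals animals gunPorts length = numberOfKilledAnimals_alt animals gunPorts length
  rw [B_eq]
  rcases hpre with h | h
  · exact A_eq_sorted animals gunPorts length h
  · exact A_eq_allnone animals gunPorts length h
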